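-- pv_equiv track=rewrite | github.com/YzyLmc/ltl_safety | src/utils.py | omit_obj_id
-- ===== SOURCE A (Python) =====
-- def omit_obj_id(script_lines):
--     '''
--     omit redundent obj index. e.g., convert (1.319) -> (319)
--     :params list(str) script_lines: script lines after line[4] (program on;y)
--     '''
--     new_script = []
--     for line in script_lines:
--         while "." in line:
--             idx = line.index(".")
--             line = line[:idx-1] + line[idx+1:]
--         new_script.append(line)
--     return new_script
-- ===== SOURCE B (Python) =====
-- def omit_obj_id(script_lines):
--     def squash(line):
--         stack = []
--         for ch in line:
--             if ch == '.':
--                 if stack: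
--                     stack.pop()
--             else:
--                 stack.append(ch)
--         return ''.join(stack)
--     return [squash(line) for line in script_lines]
-- ===== Notes on version B (the rewrite author's own statement) =====
-- stated objective: simpler
-- what changed: Replaced the repeated index()-and-reslice while loop by a single left-to-right stack pass per line (the standard backspace idiom): a dot pops the previously kept character.
import Mathlib
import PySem

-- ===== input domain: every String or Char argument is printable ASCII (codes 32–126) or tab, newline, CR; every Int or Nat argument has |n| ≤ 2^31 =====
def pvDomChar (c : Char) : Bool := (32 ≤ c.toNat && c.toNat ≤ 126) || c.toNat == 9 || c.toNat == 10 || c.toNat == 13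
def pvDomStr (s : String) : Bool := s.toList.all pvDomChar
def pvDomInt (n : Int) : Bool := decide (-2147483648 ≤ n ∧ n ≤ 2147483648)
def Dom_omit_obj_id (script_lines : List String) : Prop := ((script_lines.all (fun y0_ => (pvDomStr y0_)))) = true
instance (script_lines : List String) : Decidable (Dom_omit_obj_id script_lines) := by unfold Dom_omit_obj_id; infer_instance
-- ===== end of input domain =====

-- B replaces A's repeated index()-and-reslice while loop by a single stack pass per line (simpler).
-- Pre_ excludes exactly the lines on which A's while loop never terminates (a dot that reaches
-- index 0 of the shrinking line while characters still follow it).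


-- ===== PORT A =====
-- the 'while "." in line' loop; fuel = number of dots is a pure totality guard
-- (inside Pre_ each iteration removes exactly one dot, so the fuel is never exhausted)
def pyWhileDots : Nat → List Char → List Char
  | 0, line => line
  | fuel + 1, line =>
    if '.' ∈ line then
      let idx : Int := ((PySem.List.index? line '.').getD 0 : Nat)
      pyWhileDots fuel
        (PySem.List.slice line none (some (idx - 1)) ++
         PySem.List.slice line (some (idx + 1)) none)
    else line

def omit_obj_id (script_lines : List String) : List String :=
  script_lines.foldl
    (fun new_script line =>
      new_script ++ [String.ofList (pyWhileDots (line.toList.count '.') line.toList)]) []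

-- ===== PORT B =====
def squashLine (line : List Char) : List Char :=
  line.foldl
    (fun stack ch =>
      if ch = '.' then (if stack.isEmpty then stack else stack.dropLast)
      else stack ++ [ch]) []

def omit_obj_id_alt (script_lines : List String) : List String :=
  script_lines.map (fun line => String.ofList (squashLine line.toList))

-- ===== PRECONDITION & SPEC =====
-- Pre_ excludes exactly the lines on which A's while loop never returns (it raises nothing,
-- it diverges): every dot sits strictly right of twice the number of dots before it, except
-- that a line's final char may be a dot landing exactly on index 0 (A then ends on "." -> "").
def validLine (l : List Char) : Bool :=
  (List.range l.length).all
    (fun p => !(l.getD p ' ' == '.')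
      || decide (2 * ((l.take p).count '.') + 1 ≤ p)
      || (decide (2 * ((l.take p).count '.') = p) && decide (p + 1 = l.length)))

def Pre_omit_obj_id (script_lines : List String) : Prop :=
  ∀ s ∈ script_lines, validLine s.toList = true

instance (script_lines : List String) : Decidable (Pre_omit_obj_id script_lines) := by
  unfold Pre_omit_obj_id; infer_instance

def pvWitness_omit_obj_id : List String := ["(1.319)", "ab.ab.", "no dots"]

def Spec_omit_obj_id (script_lines : List String) (out : List String) : Prop :=
  out = omit_obj_id_alt script_lines
instance (script_lines : List String) (out : List String) : Decidable (Spec_omit_obj_id script_lines out) := by unfold Spec_omit_obj_id; infer_instance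

-- ===== CLAIM (what is proved, stated in full; the proofs are below) =====
def Claim_equal_omit_obj_id : Prop := ∀ (script_lines : List String), Dom_omit_obj_id script_lines → Pre_omit_obj_id script_lines → Spec_omit_obj_id script_lines (omit_obj_id script_lines)

-- ===== LEMMAS AND PROOFS =====

-- a dot-free line is returned unchanged for any fuel
theorem pyWhileDots_no_dot (fuel : Nat) (l : List Char) (h : '.' ∉ l) :
    pyWhileDots fuel l = l := by
  cases fuel with
  | zero => rfl
  | succ f => simp [pyWhileDots, h]

theorem index?_append_not_mem {α : Type} [BEq α] [LawfulBEq α]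
    (acc t : List α) (v : α) (h : v ∉ acc) :
    PySem.List.index? (acc ++ t) v = (PySem.List.index? t v).map (· + acc.length) := by
  induction acc with
  | nil => simp [Option.map_id']
  | cons a acc ih =>
    have hav : a ≠ v := fun hv => h (hv ▸ List.mem_cons_self)
    have h' : v ∉ acc := fun hv => h (List.mem_cons_of_mem _ hv)
    rw [List.cons_append, PySem.List.index?_cons_of_ne _ hav, ih h']
    cases PySem.List.index? t v with
    | none => simp
    | some k => simp; omega

-- the line "." alone: A removes the dot (and nothing before it) and stops with ""
theorem pyWhileDots_single_dot (f : Nat) : pyWhileDots (f + 1) ['.'] = [] := by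
  rw [pyWhileDots, if_pos (by simp), PySem.List.index?_cons_self]
  simp only [Option.getD_some, Nat.cast_zero, zero_sub, zero_add]
  rw [PySem.List.slice_to_neg_one, PySem.List.slice_from_one]
  simpa using pyWhileDots_no_dot f [] (by simp)

-- main invariant: the while loop on (stack ++ rest) computes B's fold over rest
theorem pyWhile_eq_fold (rest : List Char) :
    ∀ (acc : List Char) (fuel : Nat), '.' ∉ acc →
    (∀ p < rest.length, rest.getD p ' ' = '.' →
        2 * ((rest.take p).count '.') + 1 ≤ acc.length + p ∨
          (2 * ((rest.take p).count '.') = acc.length + p ∧ p + 1 = rest.length)) →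
    rest.count '.' ≤ fuel →
    pyWhileDots fuel (acc ++ rest)
      = rest.foldl
          (fun stack ch =>
            if ch = '.' then (if stack.isEmpty then stack else stack.dropLast)
            else stack ++ [ch]) acc := by
  induction rest with
  | nil =>
    intro acc fuel hacc _ _
    simpa using pyWhileDots_no_dot fuel acc hacc
  | cons c rs ih =>
    intro acc fuel hacc hinv hfuel
    by_cases hc : c = '.'
    · subst hc
      -- fuel is positive
      have hcnt : ('.' :: rs).count '.' = rs.count '.' + 1 := by simp
      cases fuel with
      | zero => rw [hcnt] at hfuel; omega
      | succ f =>
        by_cases hlen : 1 ≤ acc.length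
        · -- the stack is nonempty: the dot removes its predecessor
          have hne : acc ≠ [] := by
            intro h; rw [h] at hlen; simp at hlen
          have hmem : '.' ∈ acc ++ '.' :: rs := by simp
          have hidx : PySem.List.index? (acc ++ '.' :: rs) '.' = some acc.length := by
            rw [index?_append_not_mem acc _ _ hacc, PySem.List.index?_cons_self]
            simp
          rw [pyWhileDots, if_pos hmem, hidx]
          have hcast : ((acc.length : Nat) : Int) - 1 = ((acc.length - 1 : Nat) : Int) := by
            omega
          have hs1 : PySem.List.slice (acc ++ '.' :: rs) none (some ((acc.length : Int) - 1))
              = acc.dropLast := by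
            rw [hcast, PySem.List.slice_to_natCast, List.take_append_of_le_length (by omega),
              List.dropLast_eq_take]
          have hs2 : PySem.List.slice (acc ++ '.' :: rs) (some ((acc.length : Int) + 1)) none
              = rs := by
            have : ((acc.length : Int) + 1) = ((acc.length + 1 : Nat) : Int) := by omega
            rw [this, PySem.List.slice_from_natCast]
            rw [List.drop_append]
            simp [List.drop_eq_nil_of_le]
          simp only [Option.getD_some, hs1, hs2]
          have hacc' : '.' ∉ acc.dropLast := fun h => hacc (List.mem_of_mem_dropLast h)
          have hdl : acc.dropLast.length = acc.length - 1 := by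
            simp [List.length_dropLast]
          rw [ih acc.dropLast f hacc'
            (by
              intro p hp hdot
              have h3 := hinv (p + 1) (by simpa using Nat.succ_lt_succ hp) (by simpa using hdot)
              have hcount : (('.' :: rs).take (p + 1)).count '.' = ((rs.take p).count '.') + 1 := by
                simp
              rw [hcount] at h3
              simp only [List.length_cons] at h3
              rw [hdl]
              omega)
            (by rw [hcnt] at hfuel; omega)]
          simp [List.foldl_cons, List.isEmpty_iff, hne]
        · -- empty stack: the invariant forces the line to be exactly "."
          have h0 := hinv 0 (by simp) (by simp)
          simp only [List.take_zero, List.count_nil, List.length_cons, Nat.mul_zero,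
            Nat.add_zero, Nat.zero_add] at h0
          have hacc0 : acc = [] := by
            cases acc with
            | nil => rfl
            | cons a t => simp at hlen h0
          have hrs0 : rs = [] := by
            cases rs with
            | nil => rfl
            | cons b t => rw [hacc0] at h0; simp at h0
          subst hacc0; subst hrs0
          rw [List.nil_append]
          rw [pyWhileDots_single_dot]
          simp [List.foldl_cons]
    · -- non-dot: push c
      have : acc ++ c :: rs = (acc ++ [c]) ++ rs := by simp
      rw [this]
      rw [ih (acc ++ [c]) fuel
        (by simp [hacc, Ne.symm hc])
        (by
          intro p hp hdot
          have h3 := hinv (p + 1) (by simpa using Nat.succ_lt_succ hp) (by simpa using hdot)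
          have hcount : ((c :: rs).take (p + 1)).count '.' = (rs.take p).count '.' := by
            simp [hc]
          rw [hcount] at h3
          simp only [List.length_cons] at h3
          simp only [List.length_append, List.length_cons, List.length_nil]
          omega)
        (by simpa [hc] using hfuel)]
      simp [List.foldl_cons, hc]

theorem line_eq (l : List Char) (h : validLine l = true) :
    pyWhileDots (l.count '.') l = squashLine l := by
  have h' : ∀ p < l.length, l.getD p ' ' = '.' →
      2 * ((l.take p).count '.') + 1 ≤ p ∨
        (2 * ((l.take p).count '.') = p ∧ p + 1 = l.length) := by
    intro p hp hdot
    have h0 := List.all_eq_true.mp h p (List.mem_range.mpr hp)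
    have h2 : ¬ (l[p]?.getD ' ' = '.') ∨ 2 * List.count '.' (List.take p l) < p ∨
        (2 * List.count '.' (List.take p l) = p ∧ p + 1 = l.length) := by
      simpa [or_assoc] using h0
    rw [List.getD_eq_getElem?_getD] at hdot
    rcases h2 with h1 | h1 | h1
    · exact absurd hdot h1
    · left; omega
    · right; exact h1
  have := pyWhile_eq_fold l [] (l.count '.') (by simp)
    (by intro p hp hdot; simpa using h' p hp hdot) (le_refl _)
  simpa [squashLine] using this

theorem foldl_append_singleton {α β : Type} (g : α → β) (ls : List α) (init : List β) :
    ls.foldl (fun ns line => ns ++ [g line]) init = init ++ ls.map g := by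
  induction ls generalizing init with
  | nil => simp
  | cons a t ih => simp [List.foldl_cons, ih]

-- ===== VERDICT (by name: the statement is the Claim_ definition above) =====
theorem omit_obj_id_spec : Claim_equal_omit_obj_id := by
  intro ls _ hpre
  unfold Spec_omit_obj_id omit_obj_id omit_obj_id_alt
  rw [foldl_append_singleton]
  simp only [List.nil_append]
  exact List.map_congr_left fun s hs => by rw [line_eq s.toList (hpre s hs)]
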